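-- pv_equiv track=rewrite | github.com/jsmolka/tensor-ocr | src/scripts/arrange_data_sets.py | decode_onehot
-- ===== SOURCE A (Python) =====
-- def decode_onehot(onehot):
--     i = 0
--     while onehot[i] != 1:
--         i += 1
--
--     if 0 <= i <= 9:
--         j = 0
--         c = 48
--         while j < i:
--             c += 1
--             j += 1
--         return c
--     elif 10 <= i <= 35:
--         j = 10
--         c = 65
--         while j < i:
--             c += 1
--             j += 1
--         return c
--     elif 36 <= i <= 61:
--         j = 36
--         c = 97
--         while j < i:
--             c += 1
--             j += 1
--         return c
-- ===== SOURCE B (Python) =====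
-- CHARS = '0123456789ABCDEFGHIJKLMNOPQRSTUVWXYZabcdefghijklmnopqrstuvwxyz'
--
-- def decode_onehot(onehot):
--     i = 0
--     while onehot[i] != 1:
--         i += 1
--     if i < len(CHARS):
--         return ord(CHARS[i])
-- ===== Notes on version B (the rewrite author's own statement) =====
-- stated objective: simpler
-- what changed: Replaces the three range branches with their counting while-loops by a single table lookup ord(CHARS[i]) into a constant 62-char alphabet; only the initial scan for the 1 is kept (for the same IndexError).
import Mathlib
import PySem

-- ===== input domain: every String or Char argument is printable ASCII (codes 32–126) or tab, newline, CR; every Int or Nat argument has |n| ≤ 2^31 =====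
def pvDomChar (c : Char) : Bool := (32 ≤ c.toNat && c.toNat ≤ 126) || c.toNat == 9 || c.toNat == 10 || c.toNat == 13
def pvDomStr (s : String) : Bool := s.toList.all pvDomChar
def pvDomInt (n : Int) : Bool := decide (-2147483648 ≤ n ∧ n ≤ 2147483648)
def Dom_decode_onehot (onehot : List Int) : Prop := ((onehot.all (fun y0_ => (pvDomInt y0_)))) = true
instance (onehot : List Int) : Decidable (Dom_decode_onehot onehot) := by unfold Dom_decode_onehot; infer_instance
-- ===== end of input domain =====

-- B replaces A's three range branches and counting while-loops by a single lookup into a constant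
-- 62-character alphabet table; objective: simpler (same cost).


-- ===== PORT A =====
-- the scan 'i = 0; while onehot[i] != 1: i += 1' : index of the first 1, none = IndexError
def pvScanA (onehot : List Int) : Option Nat :=
  match onehot with
  | [] => none
  | x :: xs => if x = 1 then some 0 else (pvScanA xs).map (· + 1)

-- the counting loop 'while j < i: c += 1; j += 1', started with i-j = n steps remaining
def pvBump (n : Nat) (c : Int) : Int :=
  match n with
  | 0 => c
  | n + 1 => pvBump n (c + 1)

def decode_onehot (onehot : List Int) : Int :=
  match pvScanA onehot with
  | none => 0          -- Python raises IndexError here; excluded by Pre_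
  | some i =>
    if i ≤ 9 then pvBump i 48
    else if 10 ≤ i ∧ i ≤ 35 then pvBump (i - 10) 65
    else if 36 ≤ i ∧ i ≤ 61 then pvBump (i - 36) 97
    else 0             -- Python falls off and returns None; excluded by Pre_

-- ===== PORT B =====
def pvCharsB : List Char := "0123456789ABCDEFGHIJKLMNOPQRSTUVWXYZabcdefghijklmnopqrstuvwxyz".toList

-- B's identical initial scan (kept to preserve the IndexError)
def pvScanB (onehot : List Int) : Option Nat :=
  match onehot with
  | [] => none
  | x :: xs => if x = 1 then some 0 else (pvScanB xs).map (· + 1)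

def decode_onehot_alt (onehot : List Int) : Int :=
  match pvScanB onehot with
  | none => 0          -- IndexError; excluded by Pre_
  | some i =>
    if i < pvCharsB.length then
      match pvCharsB[i]? with
      | some c => (c.toNat : Int)   -- ord(CHARS[i])
      | none => 0
    else 0             -- Python returns None; excluded by Pre_

-- ===== PRECONDITION & SPEC =====
-- Pre_ excludes the inputs where A raises IndexError (no 1 at all) and the inputs where A returns
-- None rather than an int (first 1 at index ≥ 62): i.e. it requires a 1 among the first 62 entries.
def Pre_decode_onehot (onehot : List Int) : Prop := (1 : Int) ∈ onehot.take 62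
instance (onehot : List Int) : Decidable (Pre_decode_onehot onehot) := by unfold Pre_decode_onehot; infer_instance
def pvWitness_decode_onehot : List Int := [0, 0, 1]

def Spec_decode_onehot (onehot : List Int) (out : Int) : Prop := out = decode_onehot_alt onehot
instance (onehot : List Int) (out : Int) : Decidable (Spec_decode_onehot onehot out) := by unfold Spec_decode_onehot; infer_instance

-- ===== CLAIM (what is proved, stated in full; the proofs are below) =====
def Claim_equal_decode_onehot : Prop := ∀ (onehot : List Int), Dom_decode_onehot onehot → Pre_decode_onehot onehot → Spec_decode_onehot onehot (decode_onehot onehot)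

-- ===== LEMMAS AND PROOFS =====
lemma pvScanB_eq_scanA (onehot : List Int) : pvScanB onehot = pvScanA onehot := by
  induction onehot with
  | nil => rfl
  | cons x xs ih => simp [pvScanA, pvScanB, ih]

lemma pvScanA_of_pre (onehot : List Int) (n : Nat)
    (h : (1 : Int) ∈ onehot.take n) : ∃ i, pvScanA onehot = some i ∧ i < n := by
  induction onehot generalizing n with
  | nil => simp at h
  | cons x xs ih =>
    cases n with
    | zero => simp at h
    | succ n =>
      by_cases hx : x = 1
      · exact ⟨0, by simp [pvScanA, hx], Nat.succ_pos n⟩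
      · simp [List.take, List.mem_cons, Ne.symm hx] at h
        obtain ⟨i, hi, hlt⟩ := ih n h
        exact ⟨i + 1, by simp [pvScanA, hx, hi], Nat.succ_lt_succ hlt⟩

lemma pv_branches_eq : ∀ i < 62,
    (if i ≤ 9 then pvBump i 48
     else if 10 ≤ i ∧ i ≤ 35 then pvBump (i - 10) 65
     else if 36 ≤ i ∧ i ≤ 61 then pvBump (i - 36) 97
     else 0)
    = (if i < pvCharsB.length then
        match pvCharsB[i]? with
        | some c => (c.toNat : Int)
        | none => 0
       else 0) := by decide

-- ===== VERDICT (by name: the statement is the Claim_ definition above) =====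
theorem decode_onehot_spec : Claim_equal_decode_onehot := by
  intro onehot _ hpre
  unfold Spec_decode_onehot decode_onehot decode_onehot_alt
  rw [pvScanB_eq_scanA]
  obtain ⟨i, hi, hlt⟩ := pvScanA_of_pre onehot 62 hpre
  rw [hi]
  exact pv_branches_eq i hlt
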